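-- pv_equiv track=rewrite | github.com/RMurucci/redes-complexas | rede_espaço_tempo.py | communities
-- ===== SOURCE A (Python) =====
-- def communities(D, c):
--     nc = 0
--     for k in range(0,len(c)):
--         for l in list(c[k]):
--             for m in list(D.keys()):
--                 if l == m:
--                     D[m] = nc
--         nc = nc + 1
--     return D
-- ===== SOURCE B (Python) =====
-- def communities(D, c):
--     # Build a reverse index element -> last community index containing it,
--     # then assign in one pass over it (mutates D in place, like A).
--     loc = {}
--     for k, comm in enumerate(c):
--         for l in comm:
--             loc[l] = k
--     for m, k in loc.items():
--         if m in D: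
--             D[m] = k
--     return D
-- ===== Notes on version B (the rewrite author's own statement) =====
-- stated objective: faster
-- what changed: Instead of scanning all of D's keys for every element of every community, B builds one reverse index mapping each element to the last community containing it (last-wins, matching A's overwrite order) and then assigns in a single membership-tested pass over that index.
import Mathlib
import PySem

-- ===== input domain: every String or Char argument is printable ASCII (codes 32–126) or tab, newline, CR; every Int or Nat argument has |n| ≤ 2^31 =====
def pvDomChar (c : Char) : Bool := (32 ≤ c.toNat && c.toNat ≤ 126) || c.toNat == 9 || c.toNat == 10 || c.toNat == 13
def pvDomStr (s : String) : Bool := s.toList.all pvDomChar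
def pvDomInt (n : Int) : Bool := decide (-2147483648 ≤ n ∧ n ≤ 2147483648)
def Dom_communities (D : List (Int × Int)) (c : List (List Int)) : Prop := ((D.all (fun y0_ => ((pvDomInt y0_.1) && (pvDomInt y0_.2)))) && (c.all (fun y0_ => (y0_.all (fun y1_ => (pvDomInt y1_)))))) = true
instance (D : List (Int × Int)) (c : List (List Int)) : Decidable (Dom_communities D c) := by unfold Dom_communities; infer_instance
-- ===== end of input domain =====

-- B replaces A's three nested loops (for each community element, a scan of all of D's keys)
-- by one reverse index element -> last community containing it, then a single pass over that
-- index. Both A and B mutate the dict D in place in Python; the equivalence proved here is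
-- about the returned dict (same object, same contents).


-- ===== PORT A =====
-- A-side helper: 'for m in list(D.keys()): if l == m: D[m] = nc' (the keys snapshot is d.keys)
def aScan (nc : Int) (d : PySem.Dict Int Int) (l : Int) : PySem.Dict Int Int :=
  d.keys.foldl (fun d' m => if l = m then d'.insert m nc else d') d

def communities (D : List (Int × Int)) (c : List (List Int)) : List (Int × Int) :=
  -- nc = 0; for k in range(0, len(c)): for l in list(c[k]): <aScan>; nc = nc + 1
  let fin := (PySem.List.pyRange 0 (c.length : Int) 1).foldl
    (fun st k => ((PySem.List.pyGetD c k []).foldl (fun d l => aScan st.2 d l) st.1, st.2 + 1))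
    (PySem.Dict.mk D, 0)
  fin.1.items

-- ===== PORT B =====
def communities_alt (D : List (Int × Int)) (c : List (List Int)) : List (Int × Int) :=
  -- loc = {}; for k, comm in enumerate(c): for l in comm: loc[l] = k
  let loc := (PySem.List.enumerate c 0).foldl
    (fun loc p => p.2.foldl (fun loc l => loc.insert l p.1) loc) PySem.Dict.empty
  -- for m, k in loc.items(): if m in D: D[m] = k
  (loc.items.foldl (fun d p => if d.contains p.1 then d.insert p.1 p.2 else d)
    (PySem.Dict.mk D)).items

-- ===== PRECONDITION & SPEC =====
-- D stands for a Python dict, whose keys are necessarily distinct; an association list with a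
-- duplicated key corresponds to no Python input, so Pre_ excludes nothing A ever runs on.
def Pre_communities (D : List (Int × Int)) (c : List (List Int)) : Prop :=
  (D.map Prod.fst).Nodup
instance (D : List (Int × Int)) (c : List (List Int)) : Decidable (Pre_communities D c) := by
  unfold Pre_communities; infer_instance

def pvWitness_communities : (List (Int × Int)) × List (List Int) :=
  ([(1, 0), (2, 0), (5, 3)], [[1, 9], [2, 1]])

def Spec_communities (D : List (Int × Int)) (c : List (List Int)) (out : List (Int × Int)) : Prop := out = communities_alt D c
instance (D : List (Int × Int)) (c : List (List Int)) (out : List (Int × Int)) : Decidable (Spec_communities D c out) := by unfold Spec_communities; infer_instance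

-- ===== CLAIM (what is proved, stated in full; the proofs are below) =====
def Claim_equal_communities : Prop := ∀ (D : List (Int × Int)) (c : List (List Int)), Dom_communities D c → Pre_communities D c → Spec_communities D c (communities D c)

-- ===== LEMMAS AND PROOFS =====

-- last community index (counting from nc) whose list contains m
def lastIdx : List (List Int) → Int → Int → Option Int
  | [], _, _ => none
  | cl :: ct, m, nc =>
    match lastIdx ct m (nc + 1) with
    | some k => some k
    | none => if m ∈ cl then some nc else none

theorem foldl_scan_not_mem (ks : List Int) (l nc : Int)
    (h : l ∉ ks) : ∀ (d : PySem.Dict Int Int),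
    ks.foldl (fun d' m => if l = m then d'.insert m nc else d') d = d := by
  induction ks with
  | nil => intro d; rfl
  | cons a t ih =>
    intro d
    simp only [List.mem_cons, not_or] at h
    simp only [List.foldl_cons, if_neg h.1]
    exact ih h.2 d

theorem foldl_scan_nodup (ks : List Int) (l nc : Int) (h : ks.Nodup) :
    ∀ (d : PySem.Dict Int Int),
    ks.foldl (fun d' m => if l = m then d'.insert m nc else d') d
      = if l ∈ ks then d.insert l nc else d := by
  induction ks with
  | nil => intro d; simp
  | cons a t ih =>
    intro d
    rcases List.nodup_cons.mp h with ⟨ha, ht⟩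
    by_cases he : l = a
    · subst he
      simp only [List.foldl_cons, List.mem_cons, true_or, if_true]
      exact foldl_scan_not_mem t l nc ha _
    · simp only [List.foldl_cons, if_neg he, ih ht d, List.mem_cons]
      simp [he]

theorem aScan_eq (nc l : Int) (d : PySem.Dict Int Int) (h : d.keys.Nodup) :
    aScan nc d l = if l ∈ d.keys then d.insert l nc else d :=
  foldl_scan_nodup d.keys l nc h d

theorem items_condInsert (d : PySem.Dict Int Int) (m k : Int) :
    (if m ∈ d.keys then d.insert m k else d).items
      = d.items.map (fun p => if p.1 = m then (p.1, k) else p) := by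
  by_cases hm : m ∈ d.keys
  · rw [if_pos hm, PySem.Dict.items_insert_of_contains d k
      (by rw [PySem.Dict.contains_eq_decide_mem_keys]; exact decide_eq_true hm)]
    apply List.map_congr_left
    intro p _
    by_cases hp : p.1 = m
    · simp [hp]
    · simp [hp]
  · rw [if_neg hm]
    symm
    have h1 : ∀ p ∈ d.items, (fun p : Int × Int => if p.1 = m then (p.1, k) else p) p = p := by
      intro p hp
      have h2 : p.1 ∈ d.keys := PySem.Dict.mem_keys_of_mem_items d hp
      have hne : p.1 ≠ m := fun hpe => hm (hpe ▸ h2)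
      simp only [if_neg hne]
    simpa using List.map_congr_left h1

theorem keys_of_items_map (d e : PySem.Dict Int Int) (f : Int × Int → Int × Int)
    (hf : ∀ p, (f p).1 = p.1) (h : e.items = d.items.map f) : e.keys = d.keys := by
  show e.items.map (·.1) = d.items.map (·.1)
  rw [h, List.map_map]
  exact List.map_congr_left (fun p _ => hf p)

theorem items_stepA (cl : List Int) (nc : Int) :
    ∀ (d : PySem.Dict Int Int), d.keys.Nodup →
    (cl.foldl (fun d l => aScan nc d l) d).items
      = d.items.map (fun p => if p.1 ∈ cl then (p.1, nc) else p) := by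
  induction cl with
  | nil =>
    intro d _; simp
  | cons l cl' ih =>
    intro d h
    rw [List.foldl_cons, aScan_eq nc l d h]
    have hi := items_condInsert d l nc
    have hk : (if l ∈ d.keys then d.insert l nc else d).keys = d.keys :=
      keys_of_items_map d _ _ (by intro p; by_cases hp : p.1 = l <;> simp [hp]) hi
    rw [ih _ (by rw [hk]; exact h), hi, List.map_map]
    apply List.map_congr_left
    intro p _
    by_cases h1 : p.1 ∈ cl' <;> by_cases h2 : p.1 = l <;>
      simp [h1, h2, List.mem_cons]

theorem items_foldA (c : List (List Int)) :
    ∀ (d : PySem.Dict Int Int) (nc : Int), d.keys.Nodup →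
    ((c.foldl (fun st cl => (cl.foldl (fun d l => aScan st.2 d l) st.1, st.2 + 1))
        (d, nc)).1).items
      = d.items.map (fun p => match lastIdx c p.1 nc with | some k => (p.1, k) | none => p) := by
  induction c with
  | nil =>
    intro d nc _
    simp [lastIdx]
  | cons cl ct ih =>
    intro d nc h
    rw [List.foldl_cons]
    have hstep := items_stepA cl nc d h
    have hk : (cl.foldl (fun d l => aScan nc d l) d).keys = d.keys :=
      keys_of_items_map d _ _ (by intro p; by_cases hp : p.1 ∈ cl <;> simp [hp]) hstep
    rw [ih _ (nc + 1) (by rw [hk]; exact h), hstep, List.map_map]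
    apply List.map_congr_left
    intro p _
    show (match lastIdx ct _ (nc + 1) with | some k => _ | none => _) = _
    by_cases h1 : p.1 ∈ cl <;>
      rcases hl : lastIdx ct p.1 (nc + 1) with _ | k <;>
      simp [lastIdx, h1, hl]

theorem get?_insertAll (cl : List Int) (k m : Int) :
    ∀ (loc : PySem.Dict Int Int),
    (cl.foldl (fun loc l => loc.insert l k) loc).get? m
      = if m ∈ cl then some k else loc.get? m := by
  induction cl with
  | nil => intro loc; simp
  | cons l cl' ih =>
    intro loc
    rw [List.foldl_cons, ih]
    by_cases h1 : m ∈ cl' <;> by_cases h2 : m = l <;>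
      simp [PySem.Dict.get?_insert, h1, h2, List.mem_cons]

theorem get?_bLoc (c : List (List Int)) :
    ∀ (s : Int) (loc : PySem.Dict Int Int) (m : Int),
    ((PySem.List.enumerate c s).foldl
        (fun loc p => p.2.foldl (fun loc l => loc.insert l p.1) loc) loc).get? m
      = match lastIdx c m s with | some k => some k | none => loc.get? m := by
  induction c with
  | nil => intro s loc m; simp [PySem.List.enumerate, lastIdx]
  | cons cl ct ih =>
    intro s loc m
    rw [PySem.List.enumerate_cons, List.foldl_cons, ih]
    rcases hl : lastIdx ct m (s + 1) with _ | k <;>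
      by_cases h1 : m ∈ cl <;>
      simp [lastIdx, hl, h1, get?_insertAll]

theorem nodup_bLoc (c : List (List Int)) :
    ∀ (s : Int) (loc : PySem.Dict Int Int), loc.keys.Nodup →
    ((PySem.List.enumerate c s).foldl
        (fun loc p => p.2.foldl (fun loc l => loc.insert l p.1) loc) loc).keys.Nodup := by
  induction c with
  | nil => intro s loc h; simpa [PySem.List.enumerate] using h
  | cons cl ct ih =>
    intro s loc h
    rw [PySem.List.enumerate_cons, List.foldl_cons]
    exact ih _ _ (PySem.Dict.nodup_keys_foldl_insert cl (fun _ _ => s) loc h)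

theorem items_applyB (L : List (Int × Int)) :
    ∀ (d : PySem.Dict Int Int), d.keys.Nodup → (L.map Prod.fst).Nodup →
    (L.foldl (fun d p => if d.contains p.1 then d.insert p.1 p.2 else d) d).items
      = d.items.map (fun p =>
          match (PySem.Dict.mk L).get? p.1 with | some k => (p.1, k) | none => p) := by
  induction L with
  | nil =>
    intro d _ _
    simp only [List.foldl_nil]
    exact (List.map_id d.items).symm
  | cons q L' ih =>
    rcases q with ⟨qm, qk⟩
    intro d hd hL
    rcases List.nodup_cons.mp hL with ⟨hq, hL'⟩
    rw [List.foldl_cons]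
    have hcond : (if d.contains qm then d.insert qm qk else d)
        = if qm ∈ d.keys then d.insert qm qk else d := by
      rw [PySem.Dict.contains_eq_decide_mem_keys]
      by_cases h : qm ∈ d.keys <;> simp [h]
    rw [hcond]
    have hi := items_condInsert d qm qk
    have hk : (if qm ∈ d.keys then d.insert qm qk else d).keys = d.keys :=
      keys_of_items_map d _ _ (by intro p; by_cases hp : p.1 = qm <;> simp [hp]) hi
    rw [ih _ (by rw [hk]; exact hd) hL', hi, List.map_map]
    apply List.map_congr_left
    intro p _
    have hnone : p.1 = qm → (PySem.Dict.mk L').get? p.1 = none := by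
      intro hpq
      rw [PySem.Dict.get?_eq_none_iff_not_mem_keys]
      show p.1 ∉ L'.map (·.1)
      rw [hpq]
      simpa using hq
    simp only [Function.comp_apply]
    by_cases h2 : p.1 = qm
    · have hn := hnone h2
      rw [h2] at hn
      simp [PySem.Dict.get?_mk_cons, h2, hn]
    · have hbf : (qm == p.1) = false := by simpa using fun h => h2 h.symm
      simp [PySem.Dict.get?_mk_cons, h2, hbf]

theorem match_lastIdx_empty (c : List (List Int)) (m : Int) :
    (match lastIdx c m 0 with
      | some k => some k
      | none => (PySem.Dict.empty : PySem.Dict Int Int).get? m)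
    = lastIdx c m 0 := by
  rcases lastIdx c m 0 with _ | k <;> simp

-- ===== VERDICT (by name: the statement is the Claim_ definition above) =====
theorem communities_spec : Claim_equal_communities := by
  intro D c _ hPre
  unfold Spec_communities communities communities_alt
  have hD : (PySem.Dict.mk D).keys.Nodup := by
    show (D.map (·.1)).Nodup
    simpa using hPre
  rw [PySem.List.foldl_pyRange_zero_pyGetD' c []
    (fun st cl => (cl.foldl (fun d l => aScan st.2 d l) st.1, st.2 + 1))
    (PySem.Dict.mk D, 0)]
  rw [items_foldA c (PySem.Dict.mk D) 0 hD]
  set loc := (PySem.List.enumerate c 0).foldl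
    (fun loc p => p.2.foldl (fun loc l => loc.insert l p.1) loc)
    (PySem.Dict.empty : PySem.Dict Int Int) with hloc
  have hlocnd : (loc.items.map Prod.fst).Nodup := by
    show loc.keys.Nodup
    exact nodup_bLoc c 0 PySem.Dict.empty (by simp [PySem.Dict.empty, PySem.Dict.keys])
  rw [items_applyB loc.items (PySem.Dict.mk D) hD hlocnd]
  apply List.map_congr_left
  intro p _
  rw [show PySem.Dict.mk loc.items = loc from rfl, hloc, get?_bLoc c 0 PySem.Dict.empty p.1,
    match_lastIdx_empty]
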